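-- pv_equiv track=rewrite | github.com/ryandkuster/ngsComposer | tools/crinoid.py | dicto_iter
-- ===== SOURCE A (Python) =====
-- def dicto_iter(motif_dt, k, mx, ref_dt):
--     '''
--     transform the dictionaries into usable matrices for R plots
--     '''
--     for motif, count in motif_dt.items():
--         for i, window in enumerate(count):
--             for j, char in enumerate(motif):
--                 pos = (i * k) + j
--
--                 try:
--                     mx[pos][ref_dt[char]] += window
--                 except IndexError:
--                     mx = bespoke_matrix(mx, pos)
--                     mx[pos][ref_dt[char]] += window
--     return mx
--
-- def bespoke_matrix(mx, pos):
--     '''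
--     add row to matrix to accomodate variance in read lengths
--     '''
--     while len(mx) < pos + 1:
--         mx.append([0 for j in range(len(mx[0]))])
--     return mx
-- ===== SOURCE B (Python) =====
-- def dicto_iter(motif_dt, k, mx, ref_dt):
--     '''
--     transform the dictionaries into usable matrices for R plots
--     (aggregate-first rewrite: one grouping pass, then one application pass)
--     '''
--     adds = {}
--     pos_max = -1
--     for motif, count in motif_dt.items():
--         if not motif or not count:
--             continue
--         cols = [ref_dt[ch] for ch in motif]
--         top = (len(count) - 1) * k + len(motif) - 1
--         if top > pos_max:
--             pos_max = top
--         for i, window in enumerate(count):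
--             base = i * k
--             for j, col in enumerate(cols):
--                 key = (base + j, col)
--                 adds[key] = adds.get(key, 0) + window
--     if pos_max < 0:
--         return mx
--     width = len(mx[0])
--     while len(mx) <= pos_max:
--         mx.append([0] * width)
--     for (pos, col), v in adds.items():
--         mx[pos][col] += v
--     return mx
-- ===== Notes on version B (the rewrite author's own statement) =====
-- stated objective: alternative
-- what changed: A updates mx cell-by-cell inside a try/except that lazily grows the matrix one row per IndexError; B first aggregates all (position,column) increments into one dict and computes the maximum position in a single pass, then grows the matrix once and applies each aggregated sum with plain indexing and no exception handling.
-- outside the precondition, e.g. on dicto_iter({'a': [5]}, 0, [[0, 0]], {'a': -1}): A returns [[0, 5]], B returns [[0, 5]]; on dicto_iter({'a': [5]}, 1, [[0], [7, 0]], {'a': 0}): A returns [[5], [7, 0]], B returns [[5], [7, 0]]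
import Mathlib
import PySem

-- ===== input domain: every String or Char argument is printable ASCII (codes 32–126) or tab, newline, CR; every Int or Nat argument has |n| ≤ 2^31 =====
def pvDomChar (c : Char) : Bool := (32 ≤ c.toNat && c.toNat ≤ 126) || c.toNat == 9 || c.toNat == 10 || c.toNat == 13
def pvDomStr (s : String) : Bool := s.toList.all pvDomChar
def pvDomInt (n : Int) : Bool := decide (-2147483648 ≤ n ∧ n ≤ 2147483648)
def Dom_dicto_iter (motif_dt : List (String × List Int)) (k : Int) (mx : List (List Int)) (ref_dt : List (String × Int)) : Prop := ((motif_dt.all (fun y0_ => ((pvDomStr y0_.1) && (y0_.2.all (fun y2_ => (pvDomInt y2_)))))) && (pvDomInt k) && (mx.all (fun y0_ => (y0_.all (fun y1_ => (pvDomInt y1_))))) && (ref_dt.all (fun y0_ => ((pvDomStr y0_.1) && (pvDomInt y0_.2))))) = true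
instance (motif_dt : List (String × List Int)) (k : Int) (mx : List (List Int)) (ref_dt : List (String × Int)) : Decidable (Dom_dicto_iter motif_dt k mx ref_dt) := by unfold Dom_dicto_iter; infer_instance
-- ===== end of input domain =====

-- B aggregates all (position, column) increments in one dict pass and applies them to a once-grown
-- matrix, instead of A's per-cell try/except with lazy row-by-row growth; same return value (both
-- Pythons mutate `mx` in place; the equivalence proved here is about the return value).

-- ===== PORT A =====
-- shared primitive: the statement `mx[pos][col] += window` (Python negative-index wraparound;
-- none = IndexError), used by both ports
def pyAdd? (mx : List (List Int)) (pos col window : Int) : Option (List (List Int)) :=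
  match PySem.List.pyGet? mx pos with
  | none => none
  | some row =>
    match PySem.List.pyGet? row col with
    | none => none
    | some x => some (PySem.List.pySetD mx pos (PySem.List.pySetD row col (x + window)))

-- A's helper; Python raises IndexError on `mx[0]` when mx == [] — such inputs are outside Pre_
def bespoke_matrix (mx : List (List Int)) (pos : Int) : List (List Int) :=
  if (mx.length : Int) < pos + 1 then
    bespoke_matrix (mx ++ [List.replicate (mx.headD []).length 0]) pos
  else mx
termination_by (pos + 1 - (mx.length : Int)).toNat
decreasing_by simp; omega

def dicto_iter (motif_dt : List (String × List Int)) (k : Int) (mx : List (List Int)) (ref_dt : List (String × Int)) : List (List Int) :=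
  motif_dt.foldl (fun mx mc =>
    (PySem.List.enumerate mc.2 0).foldl (fun mx iw =>
      (PySem.List.enumerate mc.1.toList 0).foldl (fun mx jc =>
        match PySem.Dict.get? (PySem.Dict.mk ref_dt) (String.mk [jc.2]) with
        | none => mx      -- Python raises KeyError here: outside Pre_
        | some col =>
          match pyAdd? mx (iw.1 * k + jc.1) col iw.2 with
          | some mx' => mx'
          | none =>
            match pyAdd? (bespoke_matrix mx (iw.1 * k + jc.1)) (iw.1 * k + jc.1) col iw.2 with
            | some mx' => mx'
            | none => bespoke_matrix mx (iw.1 * k + jc.1)   -- Python raises IndexError here: outside Pre_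
        ) mx) mx) mx

-- ===== PORT B =====
def grow_matrix (mx : List (List Int)) (posMax : Int) (width : Nat) : List (List Int) :=
  if (mx.length : Int) ≤ posMax then
    grow_matrix (mx ++ [List.replicate width 0]) posMax width
  else mx
termination_by (posMax + 1 - (mx.length : Int)).toNat
decreasing_by simp; omega

-- Source B: `mx[pos][col] += v` (always in range under Pre_; Python would raise outside it)
def applyAdd (mx : List (List Int)) (pos col v : Int) : List (List Int) :=
  match pyAdd? mx pos col v with
  | some mx' => mx'
  | none => mx

def dicto_iter_alt (motif_dt : List (String × List Int)) (k : Int) (mx : List (List Int)) (ref_dt : List (String × Int)) : List (List Int) :=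
  let st := motif_dt.foldl (fun (st : PySem.Dict (Int × Int) Int × Int) mc =>
    if mc.1 = "" ∨ mc.2 = [] then st
    else
      let cols := mc.1.toList.map (fun ch => (PySem.Dict.get? (PySem.Dict.mk ref_dt) (String.mk [ch])).getD 0)  -- Python raises KeyError on a missing char: outside Pre_
      let top := ((mc.2.length : Int) - 1) * k + ((mc.1.toList.length : Int) - 1)
      let pm := if top > st.2 then top else st.2
      let d := (PySem.List.enumerate mc.2 0).foldl (fun d iw =>
        (PySem.List.enumerate cols 0).foldl (fun d jc =>
          PySem.Dict.insert d (iw.1 * k + jc.1, jc.2) (PySem.Dict.getD d (iw.1 * k + jc.1, jc.2) 0 + iw.2)) d) st.1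
      (d, pm)) (PySem.Dict.empty, -1)
  if st.2 < 0 then mx
  else
    st.1.items.foldl (fun mx kv => applyAdd mx kv.1.1 kv.1.2 kv.2)
      (grow_matrix mx st.2 (mx.headD []).length)

-- ===== PRECONDITION & SPEC =====
-- char ch has a column in ref_dt that lies inside a row of width w
def colOK (ref_dt : List (String × Int)) (w : Nat) (ch : Char) : Bool :=
  match PySem.Dict.get? (PySem.Dict.mk ref_dt) (String.mk [ch]) with
  | some v => decide (0 ≤ v ∧ v < (w : Int))
  | none => false

-- Pre_ excludes (a) inputs where A raises (missing char in ref_dt = KeyError; empty mx or an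
-- out-of-range column on a reached access = IndexError), and (b) three corners where A returns a
-- value that is an accident of its indexing: a negative k with a multi-window count (negative
-- positions hit rows through Python's negative-index wraparound), a negative in-range column
-- (same wraparound on the row), and a ragged mx whose touched rows happen to fit.
def Pre_dicto_iter (motif_dt : List (String × List Int)) (k : Int) (mx : List (List Int)) (ref_dt : List (String × Int)) : Prop :=
  ((∃ p ∈ motif_dt, p.1 ≠ "" ∧ p.2 ≠ []) → (mx ≠ [] ∧ ∀ row ∈ mx, row.length = (mx.headD []).length)) ∧
  ((∃ p ∈ motif_dt, p.1 ≠ "" ∧ 2 ≤ p.2.length) → 0 ≤ k) ∧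
  (∀ p ∈ motif_dt, p.2 ≠ [] → p.1.toList.all (colOK ref_dt (mx.headD []).length) = true)
instance (motif_dt : List (String × List Int)) (k : Int) (mx : List (List Int)) (ref_dt : List (String × Int)) : Decidable (Pre_dicto_iter motif_dt k mx ref_dt) := by unfold Pre_dicto_iter; infer_instance

def pvWitness_dicto_iter : (List (String × List Int)) × Int × List (List Int) × (List (String × Int)) :=
  ([("ab", [1, 2])], 2, [[0, 0]], [("a", 0), ("b", 1)])

def Spec_dicto_iter (motif_dt : List (String × List Int)) (k : Int) (mx : List (List Int)) (ref_dt : List (String × Int)) (out : List (List Int)) : Prop := out = dicto_iter_alt motif_dt k mx ref_dt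
instance (motif_dt : List (String × List Int)) (k : Int) (mx : List (List Int)) (ref_dt : List (String × Int)) (out : List (List Int)) : Decidable (Spec_dicto_iter motif_dt k mx ref_dt out) := by unfold Spec_dicto_iter; infer_instance

-- ===== CLAIM (what is proved, stated in full; the proofs are below) =====
def Claim_equal_dicto_iter : Prop := ∀ (motif_dt : List (String × List Int)) (k : Int) (mx : List (List Int)) (ref_dt : List (String × Int)), Dom_dicto_iter motif_dt k mx ref_dt → Pre_dicto_iter motif_dt k mx ref_dt → Spec_dicto_iter motif_dt k mx ref_dt (dicto_iter motif_dt k mx ref_dt)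

-- ===== LEMMAS AND PROOFS =====



-- the (position, column, increment) triples both programs process, in processing order
def colOf (ref_dt : List (String × Int)) (ch : Char) : Int :=
  (PySem.Dict.get? (PySem.Dict.mk ref_dt) (String.mk [ch])).getD 0

def entryEvents (k : Int) (ref_dt : List (String × Int)) (mc : String × List Int) : List (Int × Int × Int) :=
  (PySem.List.enumerate mc.2 0).flatMap (fun iw =>
    (PySem.List.enumerate mc.1.toList 0).map (fun jc => (iw.1 * k + jc.1, colOf ref_dt jc.2, iw.2)))

def events (motif_dt : List (String × List Int)) (k : Int) (ref_dt : List (String × Int)) : List (Int × Int × Int) :=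
  motif_dt.flatMap (entryEvents k ref_dt)

def growTo (X : List (List Int)) (n w : Nat) : List (List Int) :=
  X ++ List.replicate (n - X.length) (List.replicate w 0)

def addCellI (X : List (List Int)) (p c v : Int) : List (List Int) :=
  X.modify p.toNat (fun row => row.modify c.toNat (· + v))

def addManyI (X : List (List Int)) (es : List (Int × Int × Int)) : List (List Int) :=
  es.foldl (fun X e => addCellI X e.1 e.2.1 e.2.2) X

def maxNeed (es : List (Int × Int × Int)) : Nat :=
  es.foldr (fun e M => max (e.1 + 1).toNat M) 0

def sumv (es : List (Int × Int × Int)) (key : Int × Int) : Int :=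
  ((es.filter (fun e => decide ((e.1, e.2.1) = key))).map (fun e => e.2.2)).sum

-- A's step per event (the try/except body with a successful lookup)
def aStepE (mx : List (List Int)) (e : Int × Int × Int) : List (List Int) :=
  match pyAdd? mx e.1 e.2.1 e.2.2 with
  | some mx' => mx'
  | none =>
    match pyAdd? (bespoke_matrix mx e.1) e.1 e.2.1 e.2.2 with
    | some mx' => mx'
    | none => bespoke_matrix mx e.1

theorem length_growTo (X : List (List Int)) (n w : Nat) : (growTo X n w).length = max X.length n := by
  simp [growTo]; omega

theorem rows_growTo (X : List (List Int)) (n w : Nat) (h : ∀ row ∈ X, row.length = w) :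
    ∀ row ∈ growTo X n w, row.length = w := by
  intro row hr
  rcases List.mem_append.1 hr with h1 | h1
  · exact h _ h1
  · simp [List.eq_of_mem_replicate h1]

theorem growTo_growTo (X : List (List Int)) (a b w : Nat) :
    growTo (growTo X a w) b w = growTo X (max a b) w := by
  simp [growTo, List.append_assoc]
  omega

theorem length_addCellI (X : List (List Int)) (p c v : Int) : (addCellI X p c v).length = X.length := by
  simp [addCellI]

theorem getElem_addCellI (X : List (List Int)) (p c v : Int) (q : Nat)
    (hq : q < X.length) :
    (addCellI X p c v)[q]'(by simpa [addCellI] using hq) =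
      if p.toNat = q then (X[q]).modify c.toNat (· + v) else X[q] := by
  simp [addCellI, List.getElem_modify]

theorem rows_addCellI (X : List (List Int)) (p c v : Int) (w : Nat) (h : ∀ row ∈ X, row.length = w) :
    ∀ row ∈ addCellI X p c v, row.length = w := by
  intro row hr
  rcases List.mem_iff_getElem.1 hr with ⟨q, hq, rfl⟩
  have hq' : q < X.length := by simpa [addCellI] using hq
  rw [getElem_addCellI X p c v q hq']
  split
  · simp [h _ (List.getElem_mem hq')]
  · exact h _ (List.getElem_mem hq')

theorem modify_append_left' (X Y : List (List Int)) (f : List Int → List Int) (p : Nat) (hp : p < X.length) :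
    (X.modify p f) ++ Y = (X ++ Y).modify p f := by
  apply List.ext_getElem (by simp)
  intro q hq1 hq2
  rw [List.getElem_modify]
  by_cases h : q < X.length
  · rw [List.getElem_append_left (by simpa using h), List.getElem_modify,
      List.getElem_append_left h]
  · have hnp : ¬ p = q := by omega
    simp only [hnp, if_false]
    rw [List.getElem_append_right (by simpa using h), List.getElem_append_right (by omega)]
    congr 1; simp

theorem growTo_addCellI (X : List (List Int)) (p c v : Int) (n w : Nat) (hp : p.toNat < X.length) :
    growTo (addCellI X p c v) n w = addCellI (growTo X n w) p c v := by
  simp only [growTo, addCellI, List.length_modify]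
  rw [modify_append_left' _ _ _ _ hp]

theorem pyAdd?_eq_some (X : List (List Int)) (p c v : Int) (w : Nat)
    (hrows : ∀ row ∈ X, row.length = w)
    (h0p : 0 ≤ p) (hp : p < (X.length : Int)) (h0c : 0 ≤ c) (hc : c < (w : Int)) :
    pyAdd? X p c v = some (addCellI X p c v) := by
  have hpn : p.toNat < X.length := by omega
  have hrow : PySem.List.pyGet? X p = some (X[p.toNat]) := by
    rw [PySem.List.pyGet?_of_nonneg X h0p, List.getElem?_eq_getElem hpn]
  have hwr : (X[p.toNat]).length = w := hrows _ (List.getElem_mem hpn)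
  have hcn : c.toNat < (X[p.toNat]).length := by omega
  have hx : PySem.List.pyGet? (X[p.toNat]) c = some ((X[p.toNat])[c.toNat]) := by
    rw [PySem.List.pyGet?_of_nonneg (X[p.toNat]) h0c, List.getElem?_eq_getElem hcn]
  simp only [pyAdd?, hrow, hx]
  congr 1
  rw [PySem.List.pySetD_of_nonneg X _ h0p, PySem.List.pySetD_of_nonneg (X[p.toNat]) _ h0c]
  simp only [addCellI]
  rw [List.modify_eq_set_get _ hpn]; simp [List.modify_eq_set_get _ hcn]

theorem pyAdd?_none_of_ge (X : List (List Int)) (p c v : Int) (hp : (X.length : Int) ≤ p) :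
    pyAdd? X p c v = none := by
  have : PySem.List.pyGet? X p = none := by
    rw [PySem.List.pyGet?_eq_none_iff]
    simp [PySem.Raise.InRange]; omega
  simp [pyAdd?, this]

theorem bespoke_eq_growTo (mx : List (List Int)) (pos : Int) (w : Nat)
    (h1 : mx ≠ []) (h2 : ∀ row ∈ mx, row.length = w) :
    bespoke_matrix mx pos = growTo mx (pos + 1).toNat w := by
  fun_induction bespoke_matrix mx pos with
  | case1 mx h ih =>
    have hh : (mx.headD []).length = w := by
      cases mx with
      | nil => simp at h1
      | cons a l => exact h2 a (by simp)
    rw [hh] at ih ⊢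
    rw [ih (by simp) ?_]
    · simp only [growTo, List.append_assoc, List.length_append, List.length_singleton]
      congr 1
      have : (pos + 1).toNat - mx.length = ((pos + 1).toNat - (mx.length + 1)) + 1 := by omega
      rw [this, List.replicate_succ]
      simp
    · intro row hr
      rcases List.mem_append.1 hr with hr | hr
      · exact h2 _ hr
      · simp at hr; simp [hr]
  | case2 mx h =>
    simp only [growTo]
    have : (pos + 1).toNat - mx.length = 0 := by omega
    simp [this]

theorem grow_matrix_eq_growTo (mx : List (List Int)) (posMax : Int) (w : Nat) :
    grow_matrix mx posMax w = growTo mx (posMax + 1).toNat w := by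
  fun_induction grow_matrix mx posMax w with
  | case1 mx h ih =>
    rw [ih]
    simp only [growTo, List.append_assoc, List.length_append, List.length_singleton]
    congr 1
    have : (posMax + 1).toNat - mx.length = ((posMax + 1).toNat - (mx.length + 1)) + 1 := by omega
    rw [this, List.replicate_succ]
    simp
  | case2 mx h =>
    simp only [growTo]
    have : (posMax + 1).toNat - mx.length = 0 := by omega
    simp [this]

theorem growTo_of_le (X : List (List Int)) (n w : Nat) (h : n ≤ X.length) : growTo X n w = X := by
  simp [growTo, Nat.sub_eq_zero_of_le h]

theorem aStepE_eq (mx : List (List Int)) (e : Int × Int × Int) (w : Nat)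
    (hne : mx ≠ []) (hrows : ∀ row ∈ mx, row.length = w)
    (h0p : 0 ≤ e.1) (h0c : 0 ≤ e.2.1) (hc : e.2.1 < (w : Int)) :
    aStepE mx e = addCellI (growTo mx (e.1 + 1).toNat w) e.1 e.2.1 e.2.2 := by
  by_cases hp : e.1 < (mx.length : Int)
  · rw [growTo_of_le mx _ w (by omega)]
    simp [aStepE, pyAdd?_eq_some mx e.1 e.2.1 e.2.2 w hrows h0p hp h0c hc]
  · have hnone := pyAdd?_none_of_ge mx e.1 e.2.1 e.2.2 (by omega)
    have hb := bespoke_eq_growTo mx e.1 w hne hrows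
    have hlen : (growTo mx (e.1 + 1).toNat w).length = max mx.length (e.1 + 1).toNat :=
      length_growTo mx _ w
    have h2 := pyAdd?_eq_some (growTo mx (e.1 + 1).toNat w) e.1 e.2.1 e.2.2 w
      (rows_growTo mx _ w hrows) h0p (by omega) h0c hc
    simp [aStepE, hnone, hb, h2]

theorem A_main (es : List (Int × Int × Int)) (mx : List (List Int)) (w : Nat)
    (hne : mx ≠ []) (hrows : ∀ row ∈ mx, row.length = w)
    (hes : ∀ e ∈ es, 0 ≤ e.1 ∧ 0 ≤ e.2.1 ∧ e.2.1 < (w : Int)) :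
    es.foldl aStepE mx = addManyI (growTo mx (maxNeed es) w) es := by
  induction es generalizing mx with
  | nil => simp [addManyI, maxNeed, growTo]
  | cons e es ih =>
    obtain ⟨h0p, h0c, hcw⟩ := hes e (by simp)
    have hstep := aStepE_eq mx e w hne hrows h0p h0c hcw
    have hne' : addCellI (growTo mx (e.1 + 1).toNat w) e.1 e.2.1 e.2.2 ≠ [] := by
      intro hcon
      have := congrArg List.length hcon
      rw [length_addCellI, length_growTo] at this
      simp at this
      exact hne this.1
    have hrows' := rows_addCellI (growTo mx (e.1 + 1).toNat w) e.1 e.2.1 e.2.2 w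
      (rows_growTo mx _ w hrows)
    have hplt : e.1.toNat < (growTo mx (e.1 + 1).toNat w).length := by
      rw [length_growTo]; omega
    calc (e :: es).foldl aStepE mx
        = es.foldl aStepE (addCellI (growTo mx (e.1 + 1).toNat w) e.1 e.2.1 e.2.2) := by
          rw [List.foldl_cons, hstep]
      _ = addManyI (growTo (addCellI (growTo mx (e.1 + 1).toNat w) e.1 e.2.1 e.2.2) (maxNeed es) w) es := by
          rw [ih _ hne' hrows' (fun e he => hes e (by simp [he]))]
      _ = addManyI (addCellI (growTo mx (maxNeed (e :: es)) w) e.1 e.2.1 e.2.2) es := by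
          rw [growTo_addCellI _ _ _ _ _ _ hplt, growTo_growTo]
          have : max (e.1 + 1).toNat (maxNeed es) = maxNeed (e :: es) := by
            simp [maxNeed]
          rw [this]
      _ = addManyI (growTo mx (maxNeed (e :: es)) w) (e :: es) := by
          simp [addManyI]


theorem entryEvents_nil_of_skip (k : Int) (ref_dt : List (String × Int)) (mc : String × List Int)
    (h : mc.1 = "" ∨ mc.2 = []) : entryEvents k ref_dt mc = [] := by
  rcases h with h | h <;> simp [entryEvents, h]

theorem enumerate_map {α β : Type} (f : α → β) (l : List α) (s : Int) :
    PySem.List.enumerate (l.map f) s = (PySem.List.enumerate l s).map (fun p => (p.1, f p.2)) := by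
  induction l generalizing s with
  | nil => simp [PySem.List.enumerate]
  | cons x xs ih => simp [PySem.List.enumerate_cons, ih]

theorem A_restruct (motif_dt : List (String × List Int)) (k : Int) (mx : List (List Int)) (ref_dt : List (String × Int))
    (hlook : ∀ p ∈ motif_dt, p.2 ≠ [] → ∀ ch ∈ p.1.toList,
      (PySem.Dict.get? (PySem.Dict.mk ref_dt) (String.mk [ch])).isSome = true) :
    dicto_iter motif_dt k mx ref_dt = (events motif_dt k ref_dt).foldl aStepE mx := by
  unfold dicto_iter events
  rw [List.foldl_flatMap]
  apply PySem.List.foldl_congr_mem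
  intro mx mc hmc
  by_cases hc : mc.2 = []
  · simp [hc, entryEvents]
  unfold entryEvents
  rw [List.foldl_flatMap]
  apply PySem.List.foldl_congr_mem
  intro mx iw hiw
  rw [List.foldl_map]
  apply PySem.List.foldl_congr_mem
  intro mx jc hjc
  have hch : jc.2 ∈ mc.1.toList := by
    rcases (PySem.List.mem_enumerate_iff _ _ _).1 hjc with ⟨n, hn, rfl⟩
    exact List.getElem_mem hn
  obtain ⟨v, hv⟩ := Option.isSome_iff_exists.1 (hlook mc hmc hc jc.2 hch)
  simp [hv, aStepE, colOf]

def insStep (d : PySem.Dict (Int × Int) Int) (e : Int × Int × Int) : PySem.Dict (Int × Int) Int :=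
  d.insert (e.1, e.2.1) (d.getD (e.1, e.2.1) 0 + e.2.2)

def topOf (k : Int) (mc : String × List Int) : Int :=
  ((mc.2.length : Int) - 1) * k + ((mc.1.toList.length : Int) - 1)

def pmStep (k : Int) (pm : Int) (mc : String × List Int) : Int :=
  if mc.1 = "" ∨ mc.2 = [] then pm else (if topOf k mc > pm then topOf k mc else pm)

theorem foldl_pair {α β γ : Type} (l : List α) (f : β → α → β) (g : γ → α → γ) (a : β) (b : γ) :
    l.foldl (fun st x => (f st.1 x, g st.2 x)) (a, b) = (l.foldl f a, l.foldl g b) := by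
  induction l generalizing a b with
  | nil => rfl
  | cons x xs ih => simp [ih]

theorem B_restruct (motif_dt : List (String × List Int)) (k : Int) (mx : List (List Int)) (ref_dt : List (String × Int)) :
    dicto_iter_alt motif_dt k mx ref_dt =
      (if motif_dt.foldl (pmStep k) (-1) < 0 then mx
       else ((events motif_dt k ref_dt).foldl insStep PySem.Dict.empty).items.foldl
         (fun mx kv => applyAdd mx kv.1.1 kv.1.2 kv.2)
         (grow_matrix mx (motif_dt.foldl (pmStep k) (-1)) (mx.headD []).length)) := by
  unfold dicto_iter_alt
  have hsplit : motif_dt.foldl (fun (st : PySem.Dict (Int × Int) Int × Int) (mc : String × List Int) =>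
      if mc.1 = "" ∨ mc.2 = [] then st
      else
        let cols := mc.1.toList.map (fun ch => (PySem.Dict.get? (PySem.Dict.mk ref_dt) (String.mk [ch])).getD 0);
        let top := ((mc.2.length : Int) - 1) * k + ((mc.1.toList.length : Int) - 1);
        let pm := if top > st.2 then top else st.2;
        let d := (PySem.List.enumerate mc.2 0).foldl (fun d iw =>
          (PySem.List.enumerate cols 0).foldl (fun d jc =>
            PySem.Dict.insert d (iw.1 * k + jc.1, jc.2) (PySem.Dict.getD d (iw.1 * k + jc.1, jc.2) 0 + iw.2)) d) st.1;
        (d, pm)) (PySem.Dict.empty, -1)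
      = (motif_dt.foldl (fun (d : PySem.Dict (Int × Int) Int) (mc : String × List Int) =>
            if mc.1 = "" ∨ mc.2 = [] then d
            else (PySem.List.enumerate mc.2 0).foldl (fun d iw =>
              (PySem.List.enumerate (mc.1.toList.map (fun ch => (PySem.Dict.get? (PySem.Dict.mk ref_dt) (String.mk [ch])).getD 0)) 0).foldl (fun d jc =>
                PySem.Dict.insert d (iw.1 * k + jc.1, jc.2) (PySem.Dict.getD d (iw.1 * k + jc.1, jc.2) 0 + iw.2)) d) d) PySem.Dict.empty,
          motif_dt.foldl (pmStep k) (-1)) := by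
    rw [← foldl_pair]
    apply PySem.List.foldl_congr_mem
    intro st mc _
    by_cases h : mc.1 = "" ∨ mc.2 = []
    · simp [h, pmStep]
    · simp [h, pmStep, topOf]
  have hD : (motif_dt.foldl (fun (d : PySem.Dict (Int × Int) Int) (mc : String × List Int) =>
            if mc.1 = "" ∨ mc.2 = [] then d
            else (PySem.List.enumerate mc.2 0).foldl (fun d iw =>
              (PySem.List.enumerate (mc.1.toList.map (fun ch => (PySem.Dict.get? (PySem.Dict.mk ref_dt) (String.mk [ch])).getD 0)) 0).foldl (fun d jc =>
                PySem.Dict.insert d (iw.1 * k + jc.1, jc.2) (PySem.Dict.getD d (iw.1 * k + jc.1, jc.2) 0 + iw.2)) d) d) PySem.Dict.empty)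
      = (events motif_dt k ref_dt).foldl insStep PySem.Dict.empty := by
    unfold events
    rw [List.foldl_flatMap]
    apply PySem.List.foldl_congr_mem
    intro d mc _
    by_cases h : mc.1 = "" ∨ mc.2 = []
    · rw [entryEvents_nil_of_skip k ref_dt mc h]
      simp [h]
    · simp only [h, if_false]
      unfold entryEvents
      rw [List.foldl_flatMap]
      apply PySem.List.foldl_congr_mem
      intro d iw _
      rw [enumerate_map, List.foldl_map, List.foldl_map]
      apply PySem.List.foldl_congr_mem
      intro d jc _
      simp [insStep, colOf]
  rw [hsplit, hD]

theorem sumv_cons (e : Int × Int × Int) (es : List (Int × Int × Int)) (key : Int × Int) :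
    sumv (e :: es) key = (if (e.1, e.2.1) = key then e.2.2 else 0) + sumv es key := by
  simp only [sumv, List.filter_cons]
  split <;> simp_all

theorem getD_foldl_insStep (es : List (Int × Int × Int)) (d : PySem.Dict (Int × Int) Int) (key : Int × Int) :
    (es.foldl insStep d).getD key 0 = d.getD key 0 + sumv es key := by
  induction es generalizing d with
  | nil => simp [sumv]
  | cons e es ih =>
    rw [List.foldl_cons, ih, sumv_cons]
    show (PySem.Dict.insert d (e.1, e.2.1) (d.getD (e.1, e.2.1) 0 + e.2.2)).getD key 0 + sumv es key = _
    rw [PySem.Dict.getD_insert]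
    split <;> rename_i h
    · subst h; simp; ring
    · have : ¬ ((e.1, e.2.1) = key) := fun hc => h hc.symm
      simp [this]

theorem keys_foldl_insStep (es : List (Int × Int × Int)) :
    (es.foldl insStep PySem.Dict.empty).keys = PySem.Set.ofList (es.map (fun e => (e.1, e.2.1))) := by
  have := PySem.Dict.keys_foldl_insert_key es (fun e => (e.1, e.2.1))
    (fun d e => d.getD (e.1, e.2.1) 0 + e.2.2) PySem.Dict.empty
  rw [show (fun (d : PySem.Dict (Int × Int) Int) (e : Int × Int × Int) =>
      d.insert (e.1, e.2.1) (d.getD (e.1, e.2.1) 0 + e.2.2)) = insStep from rfl] at this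
  rw [this, PySem.Dict.keys_empty]
  exact PySem.Set.update_empty _

theorem nodup_keys_foldl_insStep (es : List (Int × Int × Int)) :
    (es.foldl insStep PySem.Dict.empty).keys.Nodup :=
  PySem.Dict.nodup_keys_foldl_insert_key es (fun e => (e.1, e.2.1))
    (fun d e => d.getD (e.1, e.2.1) 0 + e.2.2) PySem.Dict.empty
    (by rw [PySem.Dict.keys_empty]; exact List.nodup_nil)

theorem sumv_eq_zero_of_not_mem (es : List (Int × Int × Int)) (key : Int × Int)
    (h : key ∉ es.map (fun e => (e.1, e.2.1))) : sumv es key = 0 := by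
  induction es with
  | nil => simp [sumv]
  | cons e es ih =>
    rw [sumv_cons]
    simp at h
    rw [ih (by simpa using h.2)]
    have : ¬ ((e.1, e.2.1) = key) := by
      intro hc; exact absurd hc.symm (by simpa using h.1)
    simp [this]

theorem sumv_keyed_map (ks : List (Int × Int)) (g : Int × Int → Int) (hnd : ks.Nodup) (key : Int × Int) :
    sumv (ks.map (fun κ => (κ.1, κ.2, g κ))) key = if key ∈ ks then g key else 0 := by
  induction ks with
  | nil => simp [sumv]
  | cons κ ks ih =>
    rw [List.map_cons, sumv_cons, ih hnd.of_cons]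
    by_cases h : κ = key
    · subst h
      have hnm : κ ∉ ks := (List.nodup_cons.1 hnd).1
      simp [hnm]
    · have hne : ¬ ((κ.1, κ.2) = key) := by
        intro hc; exact h (by simpa using hc)
      have hor : (key = κ ∨ key ∈ ks) ↔ key ∈ ks := by
        constructor
        · rintro (rfl | hk)
          · exact absurd rfl h
          · exact hk
        · exact Or.inr
      simp [hne, hor]

def cellAt (X : List (List Int)) (q d : Nat) : Int := (X.getD q []).getD d 0

theorem getD_modify_nested {α : Type} [Inhabited α] (l : List α) (i : Nat) (f : α → α) (q : Nat) (d : α) :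
    (l.modify i f).getD q d = if i = q ∧ q < l.length then f (l.getD q d) else l.getD q d := by
  rw [List.getD_eq_getElem?_getD, List.getD_eq_getElem?_getD, List.getElem?_modify]
  by_cases hq : q < l.length
  · rw [List.getElem?_eq_getElem hq]
    by_cases hiq : i = q <;> simp [hiq, hq]
  · rw [List.getElem?_eq_none (by omega)]
    simp [hq]

theorem cellAt_addCellI (X : List (List Int)) (p c v : Int) (q d : Nat)
    (h0p : 0 ≤ p) (hp : p < (X.length : Int)) :
    cellAt (addCellI X p c v) q d =
      cellAt X q d + (if p.toNat = q ∧ c.toNat = d ∧ c.toNat < (X[p.toNat]'(by omega)).length then v else 0) := by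
  have hpn : p.toNat < X.length := by omega
  unfold cellAt addCellI
  rw [getD_modify_nested]
  by_cases hpq : p.toNat = q
  · subst hpq
    rw [if_pos ⟨rfl, hpn⟩, getD_modify_nested]
    rw [List.getD_eq_getElem _ _ hpn]
    by_cases hcd : c.toNat = d
    · subst hcd
      by_cases hlt : c.toNat < (X[p.toNat]'hpn).length <;> simp [hlt]
    · simp [hcd]
  · have : ¬ (p.toNat = q ∧ q < X.length) := by tauto
    simp [hpq]

theorem length_addManyI (X : List (List Int)) (es : List (Int × Int × Int)) :
    (addManyI X es).length = X.length := by
  induction es generalizing X with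
  | nil => rfl
  | cons e es ih => rw [addManyI, List.foldl_cons, ← addManyI, ih, length_addCellI]

theorem rows_addManyI (X : List (List Int)) (es : List (Int × Int × Int)) (w : Nat)
    (h : ∀ row ∈ X, row.length = w) : ∀ row ∈ addManyI X es, row.length = w := by
  induction es generalizing X with
  | nil => exact h
  | cons e es ih =>
    rw [addManyI, List.foldl_cons, ← addManyI]
    exact ih _ (rows_addCellI _ _ _ _ _ h)

theorem cellAt_addManyI (X : List (List Int)) (es : List (Int × Int × Int)) (w : Nat)
    (hrows : ∀ row ∈ X, row.length = w)
    (hes : ∀ e ∈ es, 0 ≤ e.1 ∧ e.1 < (X.length : Int) ∧ 0 ≤ e.2.1 ∧ e.2.1 < (w : Int)) (q d : Nat) :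
    cellAt (addManyI X es) q d = cellAt X q d + sumv es ((q : Int), (d : Int)) := by
  induction es generalizing X with
  | nil => simp [addManyI, sumv]
  | cons e es ih =>
    obtain ⟨h0p, hp, h0c, hc⟩ := hes e (by simp)
    rw [addManyI, List.foldl_cons, ← addManyI]
    rw [ih _ (rows_addCellI _ _ _ _ _ hrows)
      (by intro e' he'; have := hes e' (by simp [he']); simpa [length_addCellI] using this)]
    rw [cellAt_addCellI X e.1 e.2.1 e.2.2 q d h0p hp, sumv_cons]
    have hwr : (X[e.1.toNat]'(by omega)).length = w := hrows _ (List.getElem_mem (by omega))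
    by_cases hkey : (e.1, e.2.1) = ((q : Int), (d : Int))
    · have h1 : e.1.toNat = q := by
        have := congrArg Prod.fst hkey; simp at this; omega
      have h2 : e.2.1.toNat = d := by
        have := congrArg Prod.snd hkey; simp at this; omega
      have h3 : e.2.1.toNat < (X[e.1.toNat]'(by omega)).length := by omega
      have hq' : q < X.length := by omega
      have h4 : d < (X[q]'hq').length := by
        rw [hrows _ (List.getElem_mem hq')]
        omega
      rw [if_pos ⟨h1, h2, h3⟩, if_pos hkey]; ring
    · have : ¬ (e.1.toNat = q ∧ e.2.1.toNat = d ∧ e.2.1.toNat < (X[e.1.toNat]'(by omega)).length) := by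
        rintro ⟨rfl, rfl, _⟩
        exact hkey (by simp [Int.toNat_of_nonneg h0p, Int.toNat_of_nonneg h0c])
      simp [hkey, this]

theorem foldl_applyAdd_eq_addManyI (es : List (Int × Int × Int)) (X : List (List Int)) (w : Nat)
    (hrows : ∀ row ∈ X, row.length = w)
    (hes : ∀ e ∈ es, 0 ≤ e.1 ∧ e.1 < (X.length : Int) ∧ 0 ≤ e.2.1 ∧ e.2.1 < (w : Int)) :
    es.foldl (fun mx e => applyAdd mx e.1 e.2.1 e.2.2) X = addManyI X es := by
  induction es generalizing X with
  | nil => rfl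
  | cons e es ih =>
    obtain ⟨h0p, hp, h0c, hc⟩ := hes e (by simp)
    rw [List.foldl_cons, addManyI, List.foldl_cons, ← addManyI]
    have : applyAdd X e.1 e.2.1 e.2.2 = addCellI X e.1 e.2.1 e.2.2 := by
      simp [applyAdd, pyAdd?_eq_some X e.1 e.2.1 e.2.2 w hrows h0p hp h0c hc]
    rw [this, ih _ (rows_addCellI _ _ _ _ _ hrows)]
    intro e' he'
    have := hes e' (by simp [he'])
    simpa [length_addCellI] using this

theorem maxNeed_append (xs ys : List (Int × Int × Int)) :
    maxNeed (xs ++ ys) = max (maxNeed xs) (maxNeed ys) := by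
  induction xs with
  | nil => simp [maxNeed]
  | cons x xs ih => simp [maxNeed] at ih ⊢; omega

theorem le_maxNeed_of_mem (es : List (Int × Int × Int)) (e : Int × Int × Int) (he : e ∈ es) :
    (e.1 + 1).toNat ≤ maxNeed es := by
  induction es with
  | nil => simp at he
  | cons x xs ih =>
    rcases List.mem_cons.1 he with rfl | h
    · simp [maxNeed]
    · have := ih h
      simp [maxNeed] at this ⊢
      omega

theorem maxNeed_le (es : List (Int × Int × Int)) (M : Nat)
    (h : ∀ e ∈ es, (e.1 + 1).toNat ≤ M) : maxNeed es ≤ M := by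
  induction es with
  | nil => simp [maxNeed]
  | cons x xs ih =>
    have h1 := h x (by simp)
    have h2 := ih (fun e he => h e (by simp [he]))
    simp [maxNeed] at h2 ⊢
    omega

theorem mem_entryEvents_iff (k : Int) (ref_dt : List (String × Int)) (mc : String × List Int)
    (e : Int × Int × Int) :
    e ∈ entryEvents k ref_dt mc ↔ ∃ (i : Nat) (hi : i < mc.2.length) (j : Nat) (hj : j < mc.1.toList.length),
      e = ((i : Int) * k + (j : Int), colOf ref_dt (mc.1.toList[j]'hj), mc.2[i]'hi) := by
  unfold entryEvents
  simp only [List.mem_flatMap, List.mem_map]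
  constructor
  · rintro ⟨iw, hiw, jc, hjc, rfl⟩
    rcases (PySem.List.mem_enumerate_iff _ _ _).1 hiw with ⟨i, hi, rfl⟩
    rcases (PySem.List.mem_enumerate_iff _ _ _).1 hjc with ⟨j, hj, rfl⟩
    exact ⟨i, hi, j, hj, by simp⟩
  · rintro ⟨i, hi, j, hj, rfl⟩
    refine ⟨((i : Int), mc.2[i]'hi), ?_, ((j : Int), mc.1.toList[j]'hj), ?_, by simp⟩
    · exact (PySem.List.mem_enumerate_iff _ _ _).2 ⟨i, hi, by simp⟩
    · exact (PySem.List.mem_enumerate_iff _ _ _).2 ⟨j, hj, by simp⟩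

theorem maxNeed_entry (k : Int) (ref_dt : List (String × Int)) (mc : String × List Int)
    (hm : mc.1 ≠ "") (hc : mc.2 ≠ []) (hk : 0 ≤ k ∨ mc.2.length = 1) :
    maxNeed (entryEvents k ref_dt mc) = (topOf k mc + 1).toNat ∧ 0 ≤ topOf k mc := by
  have hmlen : 0 < mc.1.toList.length := by
    have : mc.1.toList ≠ [] := fun hcon => hm (String.toList_eq_nil_iff.mp hcon)
    cases hl : mc.1.toList with
    | nil => exact absurd hl this
    | cons a l => simp
  have hclen : 0 < mc.2.length := List.length_pos_iff.2 hc
  have hbound : ∀ (i j : Nat), i < mc.2.length → j < mc.1.toList.length →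
      (i : Int) * k + (j : Int) ≤ topOf k mc := by
    intro i j hi hj
    unfold topOf
    have hik : (i : Int) * k ≤ ((mc.2.length : Int) - 1) * k := by
      rcases hk with hk | hk
      · exact mul_le_mul_of_nonneg_right (by omega) hk
      · have : i = 0 := by omega
        simp [this, hk]
    omega
  have htop0 : 0 ≤ topOf k mc := by
    have := hbound 0 0 hclen hmlen
    simpa using this
  refine ⟨le_antisymm ?_ ?_, htop0⟩
  · apply maxNeed_le
    intro e he
    rcases (mem_entryEvents_iff k ref_dt mc e).1 he with ⟨i, hi, j, hj, rfl⟩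
    have := hbound i j hi hj
    simp only
    omega
  · have hmem : ((((mc.2.length - 1 : Nat) : Int)) * k + (((mc.1.toList.length - 1 : Nat) : Int)),
        colOf ref_dt (mc.1.toList[mc.1.toList.length - 1]'(by omega)),
        mc.2[mc.2.length - 1]'(by omega)) ∈ entryEvents k ref_dt mc := by
      exact (mem_entryEvents_iff k ref_dt mc _).2 ⟨mc.2.length - 1, by omega, mc.1.toList.length - 1, by omega, rfl⟩
    have := le_maxNeed_of_mem _ _ hmem
    simp only at this
    unfold topOf
    have hcast1 : ((mc.2.length - 1 : Nat) : Int) = (mc.2.length : Int) - 1 := by omega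
    have hcast2 : ((mc.1.toList.length - 1 : Nat) : Int) = (mc.1.toList.length : Int) - 1 := by omega
    rw [hcast1, hcast2] at this
    omega

theorem pm_bridge (k : Int) (ref_dt : List (String × Int)) (entries : List (String × List Int))
    (hval : ∀ mc ∈ entries, ¬(mc.1 = "" ∨ mc.2 = []) →
      maxNeed (entryEvents k ref_dt mc) = (topOf k mc + 1).toNat ∧ 0 ≤ topOf k mc) :
    ∀ acc : Int, -1 ≤ acc →
      -1 ≤ entries.foldl (pmStep k) acc ∧
      (entries.foldl (pmStep k) acc + 1).toNat
        = max (acc + 1).toNat (maxNeed (entries.flatMap (entryEvents k ref_dt))) := by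
  induction entries with
  | nil => intro acc hacc; simp [maxNeed]; omega
  | cons mc rest ih =>
    intro acc hacc
    have ihr := ih (fun x hx => hval x (by simp [hx]))
    rw [List.foldl_cons, List.flatMap_cons, maxNeed_append]
    by_cases h : mc.1 = "" ∨ mc.2 = []
    · rw [show pmStep k acc mc = acc from by simp [pmStep, h]]
      rw [entryEvents_nil_of_skip k ref_dt mc h]
      obtain ⟨hh1, hh2⟩ := ihr acc hacc
      refine ⟨hh1, ?_⟩
      rw [hh2]
      simp [maxNeed]
    · obtain ⟨hme, htop⟩ := hval mc (by simp) h
      have hstep : pmStep k acc mc = max acc (topOf k mc) := by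
        simp [pmStep, h, max_def]
        split <;> split <;> omega
      rw [hstep]
      obtain ⟨hh1, hh2⟩ := ihr (max acc (topOf k mc)) (by omega)
      refine ⟨hh1, ?_⟩
      rw [hh2, hme]
      omega

theorem foldl_pmStep_all_skip (k : Int) (entries : List (String × List Int)) (acc : Int)
    (h : ∀ mc ∈ entries, mc.1 = "" ∨ mc.2 = []) :
    entries.foldl (pmStep k) acc = acc := by
  induction entries generalizing acc with
  | nil => rfl
  | cons mc rest ih =>
    rw [List.foldl_cons, show pmStep k acc mc = acc from by simp [pmStep, h mc (by simp)]]
    exact ih _ (fun x hx => h x (by simp [hx]))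

theorem mat_ext (X Y : List (List Int)) (hl : X.length = Y.length)
    (hrl : ∀ (q : Nat) (hq : q < X.length), (X[q]).length = (Y[q]'(hl ▸ hq)).length)
    (hc : ∀ q d, cellAt X q d = cellAt Y q d) : X = Y := by
  apply List.ext_getElem hl
  intro q hq1 hq2
  apply List.ext_getElem (hrl q hq1)
  intro d hd1 hd2
  have := hc q d
  unfold cellAt at this
  rwa [List.getD_eq_getElem _ _ hq1, List.getD_eq_getElem _ _ hq2,
    List.getD_eq_getElem _ _ hd1, List.getD_eq_getElem _ _ hd2] at this

theorem events_pos (motif_dt : List (String × List Int)) (k : Int) (mx : List (List Int)) (ref_dt : List (String × Int))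
    (hPre : Pre_dicto_iter motif_dt k mx ref_dt) :
    ∀ e ∈ events motif_dt k ref_dt, 0 ≤ e.1 := by
  obtain ⟨_, hPre2, _⟩ := hPre
  intro e he
  rcases List.mem_flatMap.1 he with ⟨mc, hmc, hee⟩
  rcases (mem_entryEvents_iff k ref_dt mc e).1 hee with ⟨i, hi, j, hj, rfl⟩
  simp only
  have hm : mc.1 ≠ "" := by
    intro hcon
    have h0 : mc.1.toList = [] := by simp [hcon]
    rw [h0] at hj
    simp at hj
  by_cases hlen : 2 ≤ mc.2.length
  · have hk := hPre2 ⟨mc, hmc, hm, hlen⟩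
    have : 0 ≤ (i : Int) * k := mul_nonneg (by positivity) hk
    omega
  · have : i = 0 := by omega
    subst this
    simp

theorem events_col (motif_dt : List (String × List Int)) (k : Int) (mx : List (List Int)) (ref_dt : List (String × Int))
    (hPre : Pre_dicto_iter motif_dt k mx ref_dt) :
    ∀ e ∈ events motif_dt k ref_dt, 0 ≤ e.2.1 ∧ e.2.1 < (((mx.headD []).length : Nat) : Int) := by
  obtain ⟨_, _, hPre3⟩ := hPre
  intro e he
  rcases List.mem_flatMap.1 he with ⟨mc, hmc, hee⟩
  rcases (mem_entryEvents_iff k ref_dt mc e).1 hee with ⟨i, hi, j, hj, rfl⟩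
  have hc : mc.2 ≠ [] := by
    intro hcon; rw [hcon] at hi; simp at hi
  have hok := List.all_eq_true.mp (hPre3 mc hmc hc) (mc.1.toList[j]'hj) (List.getElem_mem hj)
  unfold colOK at hok
  unfold colOf
  split at hok
  · rename_i v hv
    rw [hv]
    simpa using hok
  · simp at hok

theorem dicto_iter_spec_aux (motif_dt : List (String × List Int)) (k : Int) (mx : List (List Int)) (ref_dt : List (String × Int))
    (hPre : Pre_dicto_iter motif_dt k mx ref_dt) :
    dicto_iter motif_dt k mx ref_dt = dicto_iter_alt motif_dt k mx ref_dt := by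
  obtain ⟨hPre1, hPre2, hPre3⟩ := hPre
  set w := (mx.headD []).length with hw
  set es := events motif_dt k ref_dt with hes
  -- A restructured
  have hA : dicto_iter motif_dt k mx ref_dt = es.foldl aStepE mx := by
    apply A_restruct
    intro p hp hpc ch hch
    have := List.all_eq_true.mp (hPre3 p hp hpc) ch hch
    unfold colOK at this
    split at this
    · simp_all
    · simp at this
  -- pm bridge facts
  have hval : ∀ mc ∈ motif_dt, ¬(mc.1 = "" ∨ mc.2 = []) →
      maxNeed (entryEvents k ref_dt mc) = (topOf k mc + 1).toNat ∧ 0 ≤ topOf k mc := by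
    intro mc hmc h
    push_neg at h
    obtain ⟨hm, hc⟩ := h
    apply maxNeed_entry k ref_dt mc hm hc
    by_cases hlen : 2 ≤ mc.2.length
    · exact Or.inl (hPre2 ⟨mc, hmc, hm, hlen⟩)
    · right
      have := List.length_pos_iff.2 hc
      omega
  obtain ⟨hpm1, hpm2⟩ := pm_bridge k ref_dt motif_dt hval (-1) (by omega)
  rw [show ((-1 : Int) + 1).toNat = 0 from rfl] at hpm2
  simp only [Nat.zero_le, max_eq_right, Nat.max_eq_right] at hpm2
  have hflat : motif_dt.flatMap (entryEvents k ref_dt) = es := rfl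
  rw [hflat] at hpm2
  rw [B_restruct, hA]
  set pm := motif_dt.foldl (pmStep k) (-1) with hpmdef
  by_cases hpm : pm < 0
  · -- no events at all
    rw [if_pos hpm]
    have hmz : maxNeed es = 0 := by
      rw [← hpm2]; omega
    have hnil : es = [] := by
      cases hese : es with
      | nil => rfl
      | cons e rest =>
        exfalso
        have h0 := events_pos motif_dt k mx ref_dt ⟨hPre1, hPre2, hPre3⟩ e (by rw [← hes, hese]; simp)
        have hle := le_maxNeed_of_mem es e (by rw [hese]; simp)
        rw [hmz] at hle
        omega
    rw [hnil]
    rfl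
  · rw [if_neg hpm]
    -- touched: some non-skip entry exists
    have htouch : ∃ p ∈ motif_dt, p.1 ≠ "" ∧ p.2 ≠ [] := by
      by_contra hcon
      push_neg at hcon
      have : pm = -1 := foldl_pmStep_all_skip k motif_dt (-1) (by
        intro mc hmc
        by_contra hx
        push_neg at hx
        exact absurd (hcon mc hmc hx.1) (by simpa using hx.2))
      omega
    obtain ⟨hne, hrows⟩ := hPre1 htouch
    have hposes := events_pos motif_dt k mx ref_dt ⟨hPre1, hPre2, hPre3⟩
    have hcoles := events_col motif_dt k mx ref_dt ⟨hPre1, hPre2, hPre3⟩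
    -- A side
    rw [A_main es mx w hne hrows (fun e he => ⟨hposes e he, hcoles e he⟩)]
    -- B side
    rw [grow_matrix_eq_growTo, ← hw, hpm2]
    set G := growTo mx (maxNeed es) w with hG
    have hGrows : ∀ row ∈ G, row.length = w := rows_growTo mx _ w hrows
    have hGlen : G.length = max mx.length (maxNeed es) := length_growTo mx _ w
    set d := es.foldl insStep PySem.Dict.empty with hd
    have hnodup : d.keys.Nodup := nodup_keys_foldl_insStep es
    have hkeys : d.keys = PySem.Set.ofList (es.map (fun e => (e.1, e.2.1))) := keys_foldl_insStep es
    have hitems : d.items = d.keys.map (fun κ => (κ, sumv es κ)) := by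
      rw [PySem.Dict.items_eq_map_keys d hnodup 0]
      apply List.map_congr_left
      intro κ hκ
      rw [getD_foldl_insStep es PySem.Dict.empty κ, PySem.Dict.getD_empty]
      simp
    have hkmem : ∀ κ ∈ d.keys, ∃ e ∈ es, (e.1, e.2.1) = κ := by
      intro κ hκ
      rw [hkeys] at hκ
      rcases List.mem_map.1 ((PySem.Set.mem_ofList _ _).1 hκ) with ⟨e, he, rfl⟩
      exact ⟨e, he, rfl⟩
    -- B fold equals addManyI over keyed sums
    rw [hitems, List.foldl_map]
    rw [show (fun (x : List (List Int)) (y : Int × Int) => applyAdd x (y, sumv es y).1.1 (y, sumv es y).1.2 (y, sumv es y).2)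
        = (fun mx κ => applyAdd mx κ.1 κ.2 (sumv es κ)) from rfl]
    have hBfold : d.keys.foldl (fun mx κ => applyAdd mx κ.1 κ.2 (sumv es κ)) G
        = addManyI G (d.keys.map (fun κ => (κ.1, κ.2, sumv es κ))) := by
      rw [← foldl_applyAdd_eq_addManyI _ G w hGrows]
      · rw [List.foldl_map]
      · intro e' he'
        rcases List.mem_map.1 he' with ⟨κ, hκ, rfl⟩
        rcases hkmem κ hκ with ⟨e, he, hkey⟩
        have h0 := hposes e he
        have hcb := hcoles e he
        have hle := le_maxNeed_of_mem es e he
        have hk1 : κ.1 = e.1 := by rw [← hkey]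
        have hk2 : κ.2 = e.2.1 := by rw [← hkey]
        simp only
        rw [hk1, hk2]
        refine ⟨h0, ?_, hcb.1, hcb.2⟩
        rw [hGlen]
        omega
    rw [hBfold]
    -- pointwise equality
    have hlen2 : (addManyI G es).length = (addManyI G (d.keys.map (fun κ => (κ.1, κ.2, sumv es κ)))).length := by
      rw [length_addManyI, length_addManyI]
    apply mat_ext _ _ hlen2
    · intro q hq
      rw [(rows_addManyI G es w hGrows) _ (List.getElem_mem hq),
        (rows_addManyI G _ w hGrows) _ (List.getElem_mem _)]
    · intro q dd
      by_cases hq : q < G.length ∧ dd < w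
      · have hesrange : ∀ e ∈ es, 0 ≤ e.1 ∧ e.1 < (G.length : Int) ∧ 0 ≤ e.2.1 ∧ e.2.1 < (w : Int) := by
          intro e he
          have h0 := hposes e he
          have hcb := hcoles e he
          have hle := le_maxNeed_of_mem es e he
          refine ⟨h0, ?_, hcb.1, hcb.2⟩
          rw [hGlen]; omega
        have hesrange' : ∀ e ∈ d.keys.map (fun κ => (κ.1, κ.2, sumv es κ)), 0 ≤ e.1 ∧ e.1 < (G.length : Int) ∧ 0 ≤ e.2.1 ∧ e.2.1 < (w : Int) := by
          intro e' he'
          rcases List.mem_map.1 he' with ⟨κ, hκ, rfl⟩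
          rcases hkmem κ hκ with ⟨e, he, hkey⟩
          have := hesrange e he
          have hk1 : κ.1 = e.1 := by rw [← hkey]
          have hk2 : κ.2 = e.2.1 := by rw [← hkey]
          simp only
          rw [hk1, hk2]
          exact this
        rw [cellAt_addManyI G es w hGrows hesrange q dd,
          cellAt_addManyI G _ w hGrows hesrange' q dd]
        congr 1
        rw [sumv_keyed_map d.keys (fun κ => sumv es κ) hnodup ((q : Int), (dd : Int))]
        split <;> rename_i hin
        · rfl
        · rw [sumv_eq_zero_of_not_mem]
          intro hcon
          rcases List.mem_map.1 hcon with ⟨e, he, hkey⟩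
          apply hin
          rw [hkeys, PySem.Set.mem_ofList]
          exact List.mem_map.2 ⟨e, he, hkey⟩
      · -- out of range: both sides have equal cells trivially (default 0)
        push_neg at hq
        unfold cellAt
        by_cases hq' : q < G.length
        · have h1 : dd ≥ w := hq hq'
          have r1 : ((addManyI G es).getD q []).length = w := by
            rw [List.getD_eq_getElem _ _ (by rwa [length_addManyI])]
            exact (rows_addManyI G es w hGrows) _ (List.getElem_mem _)
          have r2 : ((addManyI G (d.keys.map (fun κ => (κ.1, κ.2, sumv es κ)))).getD q []).length = w := by
            rw [List.getD_eq_getElem _ _ (by rwa [length_addManyI])]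
            exact (rows_addManyI G _ w hGrows) _ (List.getElem_mem _)
          have i1 : ((addManyI G es).getD q []).getD dd 0 = 0 :=
            List.getD_eq_default _ _ (by omega)
          have i2 : ((addManyI G (d.keys.map (fun κ => (κ.1, κ.2, sumv es κ)))).getD q []).getD dd 0 = 0 :=
            List.getD_eq_default _ _ (by omega)
          rw [i1, i2]
        · have o1 : (addManyI G es).getD q [] = [] :=
            List.getD_eq_default _ _ (by rw [length_addManyI]; omega)
          have o2 : (addManyI G (d.keys.map (fun κ => (κ.1, κ.2, sumv es κ)))).getD q [] = [] :=
            List.getD_eq_default _ _ (by rw [length_addManyI]; omega)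
          rw [o1, o2]

-- ===== VERDICT (by name: the statement is the Claim_ definition above) =====
theorem dicto_iter_spec : Claim_equal_dicto_iter := by
  intro motif_dt k mx ref_dt _ hPre
  unfold Spec_dicto_iter
  exact dicto_iter_spec_aux motif_dt k mx ref_dt hPre
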